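-- pv_equiv track=rewrite | github.com/nanashi0109/Algorithms_practices | hw_03/src/main_3.py | rotate_and_reverse
-- ===== SOURCE A (Python) =====
-- def rotate_and_reverse(arr: list, k: int) -> list:
--     if not isinstance(arr, list) or not isinstance(k, int):
--         raise TypeError
--
--     if not arr:
--         return []
--
--     arr_length = len(arr)
--
--     for i in range(0, k):
--         buff = arr[-1]
--
--         for j in range(arr_length-1, 0, -1):
--             arr[j] = arr[j-1]
--
--         arr[0] = buff
--
--     for i in range(0, arr_length >> 1, 1):
--         arr[i], arr[-i - 1] = arr[-i - 1], arr[i]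
--
--     return arr
-- ===== SOURCE B (Python) =====
-- def rotate_and_reverse(arr: list, k: int) -> list:
--     if not isinstance(arr, list) or not isinstance(k, int):
--         raise TypeError
--
--     if not arr:
--         return []
--
--     n = len(arr)
--     rot = (k % n) if k > 0 else 0
--     new = [arr[(n - 1 - i - rot) % n] for i in range(n)]
--     arr[:] = new
--     return arr
-- ===== Notes on version B (the rewrite author's own statement) =====
-- stated objective: faster
-- what changed: Replaces k element-by-element right rotations followed by an in-place swap reversal with a single closed-form indexed pass that writes each element directly to its final reversed-rotated position (rotation reduced mod n).
import Mathlib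
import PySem

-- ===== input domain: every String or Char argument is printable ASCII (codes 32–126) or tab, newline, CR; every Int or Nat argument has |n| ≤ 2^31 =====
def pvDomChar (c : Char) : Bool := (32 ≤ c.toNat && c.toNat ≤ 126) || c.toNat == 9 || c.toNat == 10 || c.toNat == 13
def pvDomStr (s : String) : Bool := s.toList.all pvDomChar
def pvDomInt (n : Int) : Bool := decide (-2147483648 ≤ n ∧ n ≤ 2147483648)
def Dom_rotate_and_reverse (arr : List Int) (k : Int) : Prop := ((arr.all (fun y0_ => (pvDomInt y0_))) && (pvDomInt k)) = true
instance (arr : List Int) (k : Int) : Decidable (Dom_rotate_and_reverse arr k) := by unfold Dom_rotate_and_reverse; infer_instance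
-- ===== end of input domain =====

-- B replaces A's k single-step rotations followed by an in-place swap reversal by one
-- closed-form indexed pass (rotation count reduced mod n) — objective: faster.
-- Both Pythons mutate `arr` in place and return it; the equivalence proved here is about
-- the RETURN value (B performs the same net mutation via `arr[:] = new`).

-- ===== PORT A =====
-- inner loop `for j in range(arr_length-1, 0, -1): arr[j] = arr[j-1]`, as the obvious
-- structural recursion on j (j runs arr_length-1, …, 1; the argument is the current j)
def pvShiftDown (l : List Int) : Nat → List Int
  | 0 => l
  | j + 1 => pvShiftDown (PySem.List.pySetD l ((j : Int) + 1) (PySem.List.pyGetD l (j : Int) 0)) j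

-- one iteration of the outer rotation loop: buff = arr[-1]; shift; arr[0] = buff
def pvRotOnce (n : Nat) (l : List Int) : List Int :=
  let buff := PySem.List.pyGetD l (-1) 0
  PySem.List.pySetD (pvShiftDown l (n - 1)) 0 buff

-- one iteration of the swap loop: arr[i], arr[-i-1] = arr[-i-1], arr[i]
-- (Python evaluates the right-hand pair first, then assigns left to right)
def pvSwapStep (l : List Int) (i : Int) : List Int :=
  let a := PySem.List.pyGetD l (-i - 1) 0
  let b := PySem.List.pyGetD l i 0
  PySem.List.pySetD (PySem.List.pySetD l i a) (-i - 1) b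

def rotate_and_reverse (arr : List Int) (k : Int) : List Int :=
  if arr = [] then []
  else
    let n := arr.length
    -- for i in range(0, k): …   (i unused)
    let rotated := (PySem.List.pyRange 0 k 1).foldl (fun l _ => pvRotOnce n l) arr
    -- for i in range(0, arr_length >> 1, 1): swap   (n >> 1 = n / 2 on the nonnegative length)
    (PySem.List.pyRange 0 ((n / 2 : Nat) : Int) 1).foldl pvSwapStep rotated

-- ===== PORT B =====
def rotate_and_reverse_alt (arr : List Int) (k : Int) : List Int :=
  if arr = [] then []
  else
    let n := arr.length
    let rot : Int := if k > 0 then PySem.Int.mod k (n : Int) else 0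
    -- new = [arr[(n - 1 - i - rot) % n] for i in range(n)]; arr[:] = new; return arr
    (PySem.List.pyRange 0 (n : Int) 1).map
      (fun i => PySem.List.pyGetD arr (PySem.Int.mod ((n : Int) - 1 - i - rot) (n : Int)) 0)

-- ===== PRECONDITION & SPEC =====
def Spec_rotate_and_reverse (arr : List Int) (k : Int) (out : List Int) : Prop := out = rotate_and_reverse_alt arr k
instance (arr : List Int) (k : Int) (out : List Int) : Decidable (Spec_rotate_and_reverse arr k out) := by unfold Spec_rotate_and_reverse; infer_instance

-- ===== CLAIM (what is proved, stated in full; the proofs are below) =====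
def Claim_equal_rotate_and_reverse : Prop := ∀ (arr : List Int) (k : Int), Dom_rotate_and_reverse arr k → Spec_rotate_and_reverse arr k (rotate_and_reverse arr k)

-- ===== LEMMAS AND PROOFS =====

lemma len_shiftDown (j : Nat) : ∀ (l : List Int), (pvShiftDown l j).length = l.length := by
  induction j with
  | zero => intro l; rfl
  | succ j ih => intro l; simp [pvShiftDown, ih, PySem.List.length_pySetD]

-- the inner shift loop moves every element one slot to the right (slots 1..j), head kept
lemma shiftDown_getElem (j : Nat) : ∀ (l : List Int), j < l.length →
    ∀ (i : Nat) (hi : i < (pvShiftDown l j).length),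
      (pvShiftDown l j)[i] = if 1 ≤ i ∧ i ≤ j then l[i - 1]'(by rw [len_shiftDown] at hi; omega) else l[i]'(by rwa [len_shiftDown] at hi) := by
  induction j with
  | zero =>
    intro l hj i hi
    simp only [pvShiftDown]
    split_ifs with h
    · omega
    · rfl
  | succ j ih =>
    intro l hj i hi
    rw [len_shiftDown] at hi
    have hset : PySem.List.pySetD l ((j : Int) + 1) (PySem.List.pyGetD l (j : Int) 0)
        = l.set (j + 1) (l.getD j 0) := by
      rw [show ((j : Int) + 1) = ((j + 1 : Nat) : Int) by push_cast; ring]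
      rw [PySem.List.pySetD_natCast, PySem.List.pyGetD_natCast]
    have hjl : j < l.length := by omega
    have hgd : l.getD j 0 = l[j] := List.getD_eq_getElem l 0 hjl
    have h1 : j < (PySem.List.pySetD l ((j : Int) + 1) (PySem.List.pyGetD l (j : Int) 0)).length := by
      rw [hset]; simp; omega
    have h2 : i < (pvShiftDown (PySem.List.pySetD l ((j : Int) + 1) (PySem.List.pyGetD l (j : Int) 0)) j).length := by
      rw [len_shiftDown, hset]; simpa using hi
    have key := ih _ h1 i h2
    simp only [pvShiftDown]
    rw [key]
    simp only [hset, hgd, List.getElem_set]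
    split_ifs with h1 h2 h3 h4 h5 <;> first | rfl | omega | (symm; congr 1; omega)

-- one pass of the rotation loop is a right rotation by one, i.e. l.rotate (n-1)
lemma rotOnce_eq_rotate (l : List Int) (hne : l ≠ []) :
    pvRotOnce l.length l = l.rotate (l.length - 1) := by
  have hlen : 0 < l.length := List.length_pos_of_ne_nil hne
  have hbuff : PySem.List.pyGetD l (-1) 0 = l[l.length - 1] := by
    rw [show (-1 : Int) = -((1 : Nat) : Int) by norm_num]
    rw [PySem.List.pyGetD_neg_natCast l 1 0 (by omega) (by omega)]
  apply List.ext_getElem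
  · simp [pvRotOnce, PySem.List.length_pySetD, len_shiftDown]
  · intro i hi hi2
    have hi' : i < l.length := by
      simpa [pvRotOnce, PySem.List.length_pySetD, len_shiftDown] using hi
    rw [List.getElem_rotate]
    simp only [pvRotOnce]
    simp only [PySem.List.pySetD_of_nonneg _ _ (le_refl (0:Int)), Int.toNat_zero]
    rw [List.getElem_set]
    by_cases h0 : i = 0
    · subst h0
      rw [if_pos rfl, hbuff]
      have : (0 + (l.length - 1)) % l.length = l.length - 1 := by
        rw [Nat.zero_add]; exact Nat.mod_eq_of_lt (by omega)
      simp only [this]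
    · rw [if_neg (by omega)]
      rw [shiftDown_getElem (l.length - 1) l (by omega) i (by rw [len_shiftDown]; omega)]
      rw [if_pos (by omega)]
      have : (i + (l.length - 1)) % l.length = i - 1 := by
        rw [show i + (l.length - 1) = (i - 1) + 1 * l.length by omega]
        simp [Nat.mod_eq_of_lt (show i - 1 < l.length by omega)]
      simp only [this]

-- a foldl that ignores the list elements is function iteration
lemma foldl_const_iterate {α β : Type} (L : List β) (g : α → α) (x : α) :
    L.foldl (fun s _ => g s) x = g^[L.length] x := by
  induction L generalizing x with
  | nil => rfl
  | cons b L ih => simp [List.foldl, ih, Function.iterate_succ_apply]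

lemma length_pyRange_one (b a : Int) : (PySem.List.pyRange a b).length = (b - a).toNat := by
  simp only [PySem.List.pyRange]
  split_ifs with h1 h2 <;> simp <;> omega

lemma iterate_rotOnce (l : List Int) (hne : l ≠ []) (m : Nat) :
    (pvRotOnce l.length)^[m] l = l.rotate ((l.length - 1) * m) := by
  induction m with
  | zero => simp
  | succ m ih =>
    rw [Function.iterate_succ_apply', ih]
    have hlen : (l.rotate ((l.length - 1) * m)).length = l.length := by simp
    have hne2 : l.rotate ((l.length - 1) * m) ≠ [] := by
      intro h; apply hne; simpa using congrArg List.length h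
    have := rotOnce_eq_rotate (l.rotate ((l.length - 1) * m)) hne2
    rw [hlen] at this
    rw [this, List.rotate_rotate, show (l.length - 1) * m + (l.length - 1) = (l.length - 1) * (m + 1) by ring]

lemma pySetD_neg (xs : List Int) (k : Nat) (v : Int) (hk : 0 < k) (hk' : k ≤ xs.length) :
    PySem.List.pySetD xs (-(k : Int)) v = xs.set (xs.length - k) v := by
  simp only [PySem.List.pySetD, PySem.List.pySet?, PySem.List.pyIdx?]
  rw [if_neg (by omega), if_pos (by omega)]
  simp

lemma len_swapLoop (L : List Int) : ∀ (l : List Int), (L.foldl pvSwapStep l).length = l.length := by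
  induction L with
  | nil => intro l; rfl
  | cons x L ih =>
    intro l
    simp only [List.foldl_cons, ih]
    simp [pvSwapStep, PySem.List.length_pySetD]

-- after m swap iterations the outer m positions on each side are reversed, the middle untouched
lemma swapLoop_getElem (m : Nat) : ∀ (l : List Int), 2 * m ≤ l.length →
    ∀ (i : Nat) (hi : i < l.length),
      ((PySem.List.pyRange 0 (m : Int)).foldl pvSwapStep l)[i]'(by rw [len_swapLoop]; exact hi) =
        if i < m ∨ l.length - m ≤ i then l[l.length - 1 - i]'(by omega) else l[i] := by
  induction m with
  | zero =>
    intro l hm i hi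
    simp [PySem.List.pyRange]
    omega
  | succ m ih =>
    intro l hm i hi
    have hrange : PySem.List.pyRange 0 ((m : Int) + 1) = PySem.List.pyRange 0 (m : Int) ++ [(m : Int)] :=
      PySem.List.pyRange_one_succ_right (by positivity)
    have hcast : (((m + 1 : Nat)) : Int) = (m : Int) + 1 := by push_cast; ring
    have ihget := ih l (by omega)
    set S := (PySem.List.pyRange 0 (m : Int)).foldl pvSwapStep l with hS
    have hSlen : S.length = l.length := len_swapLoop _ l
    have hstep : (PySem.List.pyRange 0 (((m + 1 : Nat)) : Int)).foldl pvSwapStep l = pvSwapStep S m := by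
      rw [hcast, hrange, List.foldl_append]
      rfl
    have hmn : m < l.length := by omega
    have ha : PySem.List.pyGetD S (-(m : Int) - 1) 0 = S[l.length - (m + 1)]'(by omega) := by
      rw [show (-(m : Int) - 1) = -(((m + 1 : Nat)) : Int) by push_cast; ring]
      rw [PySem.List.pyGetD_neg_natCast S (m + 1) 0 (by omega) (by omega)]
      congr 1
      omega
    have hb : PySem.List.pyGetD S (m : Int) 0 = S[m]'(by omega) := by
      rw [PySem.List.pyGetD_natCast]
      exact List.getD_eq_getElem S 0 (by omega)
    have hset1 : PySem.List.pySetD S (m : Int) (S[l.length - (m + 1)]'(by omega)) = S.set m (S[l.length - (m + 1)]'(by omega)) := PySem.List.pySetD_natCast _ _ _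
    have hres : pvSwapStep S m =
        (S.set m (S[l.length - (m + 1)]'(by omega))).set (l.length - (m + 1)) (S[m]'(by omega)) := by
      show PySem.List.pySetD (PySem.List.pySetD S (m : Int) (PySem.List.pyGetD S (-(m:Int) - 1) 0)) (-(m:Int) - 1) (PySem.List.pyGetD S (m : Int) 0) = _
      rw [ha, hb, hset1]
      rw [show (-(m : Int) - 1) = -(((m + 1 : Nat)) : Int) by push_cast; ring]
      rw [pySetD_neg _ (m + 1) _ (by omega) (by simp; omega)]
      simp [hSlen]
    have e1 : ((PySem.List.pyRange 0 (((m + 1 : Nat)) : Int)).foldl pvSwapStep l)[i]'(by rw [len_swapLoop]; exact hi)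
        = ((S.set m (S[l.length - (m + 1)]'(by omega))).set (l.length - (m + 1)) (S[m]'(by omega)))[i]'(by simp [hSlen]; omega) := by
      simp only [hstep, hres]
    rw [e1, List.getElem_set, List.getElem_set]
    by_cases hp : l.length - (m + 1) = i
    · rw [if_pos hp]
      rw [ihget m (by omega)]
      rw [if_neg (by omega), if_pos (show i < m + 1 ∨ l.length - (m + 1) ≤ i by omega)]
      congr 1
      omega
    · rw [if_neg hp]
      by_cases hm2 : m = i
      · rw [if_pos hm2]
        rw [ihget (l.length - (m + 1)) (by omega)]
        rw [if_neg (by omega), if_pos (show i < m + 1 ∨ l.length - (m + 1) ≤ i by omega)]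
        congr 1
        omega
      · rw [if_neg hm2, ihget i hi]
        by_cases hc : i < m ∨ l.length - m ≤ i
        · rw [if_pos hc, if_pos (show i < m + 1 ∨ l.length - (m + 1) ≤ i by omega)]
        · rw [if_neg hc, if_neg (show ¬(i < m + 1 ∨ l.length - (m + 1) ≤ i) by omega)]

lemma swapLoop_eq_reverse (l : List Int) :
    (PySem.List.pyRange 0 ((l.length / 2 : Nat) : Int)).foldl pvSwapStep l = l.reverse := by
  apply List.ext_getElem
  · simp [len_swapLoop]
  · intro i hi hi2
    rw [len_swapLoop] at hi
    rw [swapLoop_getElem (l.length / 2) l (by omega) i hi]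
    rw [List.getElem_reverse]
    by_cases hc : i < l.length / 2 ∨ l.length - l.length / 2 ≤ i
    · rw [if_pos hc]
    · rw [if_neg hc]
      congr 1
      omega

-- fmod with a positive divisor is emod
lemma fmod_pos_eq_emod (a b : Int) (hb : 0 < b) : PySem.Int.mod a b = a % b := by
  show Int.fmod a b = a % b
  rw [Int.fmod_eq_emod, if_pos (Or.inl (le_of_lt hb)), add_zero]

-- ===== VERDICT (by name: the statement is the Claim_ definition above) =====
theorem rotate_and_reverse_spec : Claim_equal_rotate_and_reverse := by
  unfold Claim_equal_rotate_and_reverse Spec_rotate_and_reverse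
  intro arr k _
  by_cases hne : arr = []
  · simp [rotate_and_reverse, rotate_and_reverse_alt, hne]
  · unfold rotate_and_reverse rotate_and_reverse_alt
    rw [if_neg hne, if_neg hne]
    show (PySem.List.pyRange 0 ((arr.length / 2 : Nat) : Int) 1).foldl pvSwapStep
        ((PySem.List.pyRange 0 k 1).foldl (fun l _ => pvRotOnce arr.length l) arr)
      = (PySem.List.pyRange 0 (arr.length : Int) 1).map
          (fun i => PySem.List.pyGetD arr (PySem.Int.mod ((arr.length : Int) - 1 - i - (if k > 0 then PySem.Int.mod k (arr.length : Int) else 0)) (arr.length : Int)) 0)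
    have hn0 : 0 < arr.length := List.length_pos_of_ne_nil hne
    -- A's rotation loop
    have hrot : (PySem.List.pyRange 0 k 1).foldl (fun l _ => pvRotOnce arr.length l) arr
        = arr.rotate ((arr.length - 1) * k.toNat) := by
      rw [foldl_const_iterate, length_pyRange_one]
      rw [show k - 0 = k by ring]
      exact iterate_rotOnce arr hne k.toNat
    rw [hrot]
    have hRlen : (arr.rotate ((arr.length - 1) * k.toNat)).length = arr.length := by simp
    have hswap : (PySem.List.pyRange 0 ((arr.length / 2 : Nat) : Int) 1).foldl pvSwapStep (arr.rotate ((arr.length - 1) * k.toNat)) = (arr.rotate ((arr.length - 1) * k.toNat)).reverse := by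
      have := swapLoop_eq_reverse (arr.rotate ((arr.length - 1) * k.toNat))
      rwa [hRlen] at this
    rw [hswap]
    -- B as a map over List.range n
    rw [PySem.List.pyRange_zero_natCast, List.map_map]
    apply List.ext_getElem
    · simp [hRlen]
    · intro i hi hi2
      have hin : i < arr.length := by simpa [hRlen] using hi
      rw [List.getElem_reverse, List.getElem_map, List.getElem_range]
      simp only [Function.comp_apply]
      have hRi : (arr.rotate ((arr.length - 1) * k.toNat))[(arr.rotate ((arr.length - 1) * k.toNat)).length - 1 - i]'(by omega)
          = arr[(((arr.length - 1 - i) + (arr.length - 1) * k.toNat) % arr.length)]'(Nat.mod_lt _ hn0) := by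
        rw [List.getElem_rotate]
        congr 1
        simp only [List.length_rotate]
      rw [hRi]
      -- B's element
      have hnz : ((arr.length : Nat) : Int) ≠ 0 := by exact_mod_cast hn0.ne'
      have hpos : (0 : Int) < ((arr.length : Nat) : Int) := by exact_mod_cast hn0
      have hfm : PySem.Int.mod ((arr.length : Int) - 1 - (i : Int) - (if k > 0 then PySem.Int.mod k (arr.length : Int) else 0)) (arr.length : Int)
          = ((arr.length : Int) - 1 - (i : Int) - (if k > 0 then k % (arr.length : Int) else 0)) % (arr.length : Int) := by
        rw [fmod_pos_eq_emod _ _ hpos]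
        by_cases hk : k > 0
        · rw [if_pos hk, if_pos hk, fmod_pos_eq_emod _ _ hpos]
        · rw [if_neg hk, if_neg hk]
      rw [hfm]
      set rot : Int := if k > 0 then k % (arr.length : Int) else 0 with hrotdef
      have hE0 : (0 : Int) ≤ ((arr.length : Int) - 1 - (i : Int) - rot) % (arr.length : Int) :=
        Int.emod_nonneg _ hnz
      have hE1 : ((arr.length : Int) - 1 - (i : Int) - rot) % (arr.length : Int) < (arr.length : Int) :=
        Int.emod_lt_of_pos _ hpos
      rw [PySem.List.pyGetD_eq_getElem arr 0 hE0 hE1]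
      -- indices agree
      congr 1
      have key : (((arr.length - 1 - i) + (arr.length - 1) * k.toNat : Nat) : Int) % (arr.length : Int)
          = ((arr.length : Int) - 1 - (i : Int) - rot) % (arr.length : Int) := by
        by_cases hk : k > 0
        · have hkto : ((k.toNat : Nat) : Int) = k := Int.toNat_of_nonneg (le_of_lt hk)
          have hrw : rot = k % (arr.length : Int) := by rw [hrotdef, if_pos hk]
          have expand : (((arr.length - 1 - i) + (arr.length - 1) * k.toNat : Nat) : Int)
              = ((arr.length : Int) - 1 - (i : Int) - rot) + (arr.length : Int) * (k - k / (arr.length : Int)) := by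
            have e1 : ((arr.length - 1 - i : Nat) : Int) = (arr.length : Int) - 1 - (i : Int) := by omega
            have e2 : ((arr.length - 1 : Nat) : Int) = (arr.length : Int) - 1 := by omega
            rw [hrw, Int.emod_def]
            push_cast
            rw [e1, e2, hkto]
            ring
          rw [expand, Int.add_mul_emod_self_left]
        · have hkto : k.toNat = 0 := Int.toNat_of_nonpos (by omega)
          have hrw : rot = 0 := by rw [hrotdef, if_neg hk]
          rw [hkto, hrw]
          have h2 : (i : Int) < (arr.length : Int) := by exact_mod_cast hin
          push_cast
          congr 1
          omega
      have hcastmod : (((arr.length - 1 - i) + (arr.length - 1) * k.toNat : Nat) % arr.length : Nat)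
          = ((((arr.length - 1 - i) + (arr.length - 1) * k.toNat : Nat) : Int) % ((arr.length : Nat) : Int)).toNat := by
        rw [← Int.natCast_mod, Int.toNat_natCast]
      rw [hcastmod, key]
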